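-- pv_equiv track=rewrite | github.com/Tochiko/tcprog-py | uebung1/init_V.py | get_ijk
-- ===== SOURCE A (Python) =====
-- def get_ijk(lmax):
--     slist = []
--     for s in range(lmax + 1):
--         for i in range(s + 1):
--             for j in range(s + 1):
--                 for k in range(s + 1):
--                     if i + j + k == s:
--                         slist.append((i, j, k))
--     return slist
-- ===== SOURCE B (Python) =====
-- def _triples(s):
--     # all (i, j, k) with i, j, k >= 0 and i + j + k == s, i then j ascending
--     return [(i, j, s - i - j) for i in range(s + 1) for j in range(s - i + 1)]
--
-- def get_ijk(lmax):
--     return [t for s in range(lmax + 1) for t in _triples(s)]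
-- ===== Notes on version B (the rewrite author's own statement) =====
-- stated objective: faster
-- what changed: Replaces the four nested accumulator loops with a per-s helper that directly generates each triple as (i, j, s-i-j) via nested comprehensions (no k-scan, no membership test), flattening the per-s blocks into the result; O(lmax^4) enumeration becomes O(lmax^3) direct generation.
import Mathlib
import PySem

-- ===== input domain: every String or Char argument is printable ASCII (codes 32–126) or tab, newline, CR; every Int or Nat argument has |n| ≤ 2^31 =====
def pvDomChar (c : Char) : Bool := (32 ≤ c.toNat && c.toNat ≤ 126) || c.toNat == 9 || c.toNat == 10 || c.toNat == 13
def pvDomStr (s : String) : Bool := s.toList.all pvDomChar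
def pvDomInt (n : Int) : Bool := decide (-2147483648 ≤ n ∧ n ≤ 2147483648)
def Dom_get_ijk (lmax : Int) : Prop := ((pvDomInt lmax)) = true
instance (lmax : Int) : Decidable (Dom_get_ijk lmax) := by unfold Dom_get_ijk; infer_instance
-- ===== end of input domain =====

-- B generates each triple directly as (i, j, s-i-j) per s via nested comprehensions (no k-scan): asymptotically faster.
-- ===== PORT A =====
def get_ijk (lmax : Int) : List (List Int) :=
  (PySem.List.pyRange 0 (lmax + 1) 1).foldl (fun sl s =>
    (PySem.List.pyRange 0 (s + 1) 1).foldl (fun sl i =>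
      (PySem.List.pyRange 0 (s + 1) 1).foldl (fun sl j =>
        (PySem.List.pyRange 0 (s + 1) 1).foldl (fun sl k =>
          if i + j + k = s then sl ++ [[i, j, k]] else sl) sl) sl) sl) []

-- ===== PORT B =====
-- helper _triples(s): nested list comprehension over i, then j, with k computed directly
def pvTriples (s : Int) : List (List Int) :=
  (List.range (s + 1).toNat).flatMap (fun (i : Nat) =>
    (List.range (s - (i : Int) + 1).toNat).map (fun (j : Nat) => [(i : Int), (j : Int), s - (i : Int) - (j : Int)]))

def get_ijk_alt (lmax : Int) : List (List Int) :=
  (List.range (lmax + 1).toNat).flatMap (fun (s : Nat) => pvTriples (s : Int))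

-- ===== PRECONDITION & SPEC =====
def Spec_get_ijk (lmax : Int) (out : List (List Int)) : Prop := out = get_ijk_alt lmax
instance (lmax : Int) (out : List (List Int)) : Decidable (Spec_get_ijk lmax out) := by unfold Spec_get_ijk; infer_instance

-- ===== CLAIM (what is proved, stated in full; the proofs are below) =====
def Claim_equal_get_ijk : Prop := ∀ (lmax : Int), Dom_get_ijk lmax → Spec_get_ijk lmax (get_ijk lmax)

-- ===== LEMMAS AND PROOFS =====


-- flatMap over a mapped list
lemma pvFlatMapMap {α β γ : Type} (l : List α) (f : α → β) (g : β → List γ) :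
    (l.map f).flatMap g = l.flatMap (fun x => g (f x)) := by
  induction l with
  | nil => rfl
  | cons a t ih => simp [List.flatMap_cons, ih]

-- the k-filter keeps exactly the single solution k = s-i-j when it lies in range
lemma filter_eq_target (a b t : Int) :
    (PySem.List.pyRange a b 1).filter (fun k => decide (k = t)) =
    if a ≤ t ∧ t < b then [t] else [] := by
  by_cases h : b ≤ a
  · rw [PySem.List.pyRange_one_eq_nil h]
    simp; omega
  · push Not at h
    by_cases ht : a ≤ t ∧ t < b
    · rw [PySem.List.pyRange_one_append a t b ht.1 (by omega),
        PySem.List.pyRange_one_cons ht.2, List.filter_append]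
      simp only [List.filter_cons]
      rw [List.filter_eq_nil_iff.mpr, List.filter_eq_nil_iff.mpr]
      · simp [ht]
      · intro x hx; rw [PySem.List.mem_pyRange_one] at hx; simp; omega
      · intro x hx; rw [PySem.List.mem_pyRange_one] at hx; simp; omega
    · rw [if_neg ht, List.filter_eq_nil_iff]
      intro x hx; rw [PySem.List.mem_pyRange_one] at hx; simp; omega

-- A's innermost k-loop produces at most one triple
lemma k_loop (s i j : Int) (sl : List (List Int)) :
    (PySem.List.pyRange 0 (s + 1) 1).foldl (fun sl k =>
      if i + j + k = s then sl ++ [[i, j, k]] else sl) sl =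
    sl ++ if 0 ≤ s - i - j ∧ s - i - j < s + 1 then [[i, j, s - i - j]] else [] := by
  have : (PySem.List.pyRange 0 (s + 1) 1).foldl (fun sl k =>
      if i + j + k = s then sl ++ [[i, j, k]] else sl) sl =
      (PySem.List.pyRange 0 (s + 1) 1).foldl (fun sl k =>
      if k = s - i - j then sl ++ [[i, j, k]] else sl) sl := by
    apply PySem.List.foldl_congr_mem
    intro acc x _
    by_cases h : i + j + x = s
    · rw [if_pos h, if_pos (by omega)]
    · rw [if_neg h, if_neg (by omega)]
  rw [this, PySem.List.foldl_append_ite (fun k => k = s - i - j) (fun k => [i, j, k]),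
    filter_eq_target]
  by_cases h : 0 ≤ s - i - j ∧ s - i - j < s + 1
  · rw [if_pos h, if_pos h]; simp
  · rw [if_neg h, if_neg h]; simp

-- A's j-loop (for 0 ≤ i ≤ s) appends exactly B's per-(s,i) comprehension
lemma j_loop (s i : Int) (hi : 0 ≤ i) (sl : List (List Int)) :
    (PySem.List.pyRange 0 (s + 1) 1).foldl (fun sl j =>
      (PySem.List.pyRange 0 (s + 1) 1).foldl (fun sl k =>
        if i + j + k = s then sl ++ [[i, j, k]] else sl) sl) sl =
    sl ++ (List.range (s - i + 1).toNat).map (fun (j : Nat) => [i, (j : Int), s - i - (j : Int)]) := by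
  have h1 : (PySem.List.pyRange 0 (s + 1) 1).foldl (fun sl j =>
      (PySem.List.pyRange 0 (s + 1) 1).foldl (fun sl k =>
        if i + j + k = s then sl ++ [[i, j, k]] else sl) sl) sl =
      (PySem.List.pyRange 0 (s + 1) 1).foldl (fun sl j =>
        if i + j ≤ s then sl ++ [[i, j, s - i - j]] else sl) sl := by
    apply PySem.List.foldl_congr_mem
    intro acc j hj
    rw [PySem.List.mem_pyRange_one] at hj
    rw [k_loop]
    by_cases h : i + j ≤ s
    · rw [if_pos (by omega), if_pos h]
    · rw [if_neg (by omega), if_neg h]; simp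
  rw [h1, PySem.List.foldl_append_ite (fun j => i + j ≤ s) (fun j => [i, j, s - i - j])]
  congr 1
  -- the filtered j-range is exactly range(s-i+1)
  have h2 : (PySem.List.pyRange 0 (s + 1) 1).filter (fun j => decide (i + j ≤ s)) =
      PySem.List.pyRange 0 (s - i + 1) 1 := by
    by_cases h : s - i + 1 ≤ 0
    · rw [PySem.List.pyRange_one_eq_nil h, List.filter_eq_nil_iff]
      intro x hx
      by_cases h2 : s + 1 ≤ 0
      · rw [PySem.List.pyRange_one_eq_nil h2] at hx; simp at hx
      · rw [PySem.List.mem_pyRange_one] at hx; simp; omega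
    · rw [PySem.List.pyRange_one_append 0 (s - i + 1) (s + 1) (by omega) (by omega),
        List.filter_append]
      rw [List.filter_eq_self.mpr, List.filter_eq_nil_iff.mpr, List.append_nil]
      · intro x hx; rw [PySem.List.mem_pyRange_one] at hx; simp; omega
      · intro x hx; rw [PySem.List.mem_pyRange_one] at hx; simp; omega
  rw [h2, PySem.List.pyRange_one, List.map_map]
  simp only [sub_zero, Function.comp_def, zero_add]

-- per-s, A's i/j/k loops append exactly B's helper pvTriples s
lemma s_body (s : Int) (sl : List (List Int)) :
    (PySem.List.pyRange 0 (s + 1) 1).foldl (fun sl i =>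
      (PySem.List.pyRange 0 (s + 1) 1).foldl (fun sl j =>
        (PySem.List.pyRange 0 (s + 1) 1).foldl (fun sl k =>
          if i + j + k = s then sl ++ [[i, j, k]] else sl) sl) sl) sl =
    sl ++ pvTriples s := by
  have h1 : (PySem.List.pyRange 0 (s + 1) 1).foldl (fun sl i =>
      (PySem.List.pyRange 0 (s + 1) 1).foldl (fun sl j =>
        (PySem.List.pyRange 0 (s + 1) 1).foldl (fun sl k =>
          if i + j + k = s then sl ++ [[i, j, k]] else sl) sl) sl) sl =
      (PySem.List.pyRange 0 (s + 1) 1).foldl (fun sl i =>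
        sl ++ (List.range (s - i + 1).toNat).map (fun (j : Nat) => [i, (j : Int), s - i - (j : Int)])) sl := by
    apply PySem.List.foldl_congr_mem
    intro acc i hi
    rw [PySem.List.mem_pyRange_one] at hi
    exact j_loop s i hi.1 acc
  rw [h1, PySem.List.foldl_append_eq_flatMap]
  congr 1
  rw [pvTriples, PySem.List.pyRange_one, pvFlatMapMap]
  simp only [zero_add, sub_zero]

-- ===== VERDICT (by name: the statement is the Claim_ definition above) =====
theorem get_ijk_spec : Claim_equal_get_ijk := by
  intro lmax _
  unfold Spec_get_ijk get_ijk get_ijk_alt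
  have h : (PySem.List.pyRange 0 (lmax + 1) 1).foldl (fun sl s =>
      (PySem.List.pyRange 0 (s + 1) 1).foldl (fun sl i =>
        (PySem.List.pyRange 0 (s + 1) 1).foldl (fun sl j =>
          (PySem.List.pyRange 0 (s + 1) 1).foldl (fun sl k =>
            if i + j + k = s then sl ++ [[i, j, k]] else sl) sl) sl) sl) [] =
      (PySem.List.pyRange 0 (lmax + 1) 1).foldl (fun sl s => sl ++ pvTriples s) [] := by
    apply PySem.List.foldl_congr_mem
    intro acc s _
    exact s_body s acc
  rw [h, PySem.List.foldl_append_eq_flatMap, List.nil_append,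
    PySem.List.pyRange_one, pvFlatMapMap]
  simp only [zero_add, sub_zero]
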